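-- pv_equiv track=rewrite | github.com/um-computacion-tm/ajedrez-2024-francovaco | piece.py | possible_moves_general
-- ===== SOURCE A (Python) =====
-- def possible_moves_general(from_row, from_col, directions, single_step=False):
--     '''
--     La función retorna los movimientos posibles de la pieza.
--     Funcionamiento:
--     Se crea una lista vacía llamada moves.
--     Se recorre la lista directions.
--     Se crea una variable new_row y new_col con los valores de from_row y from_col.
--     Se recorre la lista directions.
--     Se actualiza new_row y new_col.
--     Se verifica si la nueva posición está dentro del tablero.
--     Se agrega la nueva posición a la lista moves.
--     Se verifica si single_step es True.
--     Parámetros: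
--     from_row: Recibe la fila de la posición actual de la pieza.
--     from_col: Recibe la columna de la posición actual de la pieza.
--     directions: Recibe una lista con las direcciones posibles de movimiento.
--     single_step: Recibe un valor booleano que indica si la pieza puede moverse una sola posición.
--     '''
--     moves = []
--     for direction in directions:
--         new_row, new_col = from_row, from_col
--         while True:
--             new_row += direction[0]
--             new_col += direction[1]
--             if 0 <= new_row < 8 and 0 <= new_col < 8:
--                 moves.append((new_row, new_col))
--                 if single_step:
--                     break
--             else:
--                 break
--     return moves
-- ===== SOURCE B (Python) =====
-- def possible_moves_general(from_row, from_col, directions, single_step=False):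
--     moves = []
--     for dr, dc in directions:
--         r1, c1 = from_row + dr, from_col + dc
--         if not (0 <= r1 < 8 and 0 <= c1 < 8):
--             continue
--         if single_step:
--             k = 1
--         else:
--             bounds = []
--             if dr > 0:
--                 bounds.append((7 - from_row) // dr)
--             elif dr < 0:
--                 bounds.append(from_row // (-dr))
--             if dc > 0:
--                 bounds.append((7 - from_col) // dc)
--             elif dc < 0:
--                 bounds.append(from_col // (-dc))
--             k = min(bounds)
--         moves.extend((from_row + i * dr, from_col + i * dc) for i in range(1, k + 1))
--     return moves
-- ===== Notes on version B (the rewrite author's own statement) =====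
-- stated objective: alternative
-- what changed: B replaces A's incremental walk (a while-loop stepping one square at a time until it leaves the board) by a closed form: per direction it computes the maximal in-bounds step count k via floor divisions on each nonzero axis and emits the k positions directly from range(1,k+1).
import Mathlib
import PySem

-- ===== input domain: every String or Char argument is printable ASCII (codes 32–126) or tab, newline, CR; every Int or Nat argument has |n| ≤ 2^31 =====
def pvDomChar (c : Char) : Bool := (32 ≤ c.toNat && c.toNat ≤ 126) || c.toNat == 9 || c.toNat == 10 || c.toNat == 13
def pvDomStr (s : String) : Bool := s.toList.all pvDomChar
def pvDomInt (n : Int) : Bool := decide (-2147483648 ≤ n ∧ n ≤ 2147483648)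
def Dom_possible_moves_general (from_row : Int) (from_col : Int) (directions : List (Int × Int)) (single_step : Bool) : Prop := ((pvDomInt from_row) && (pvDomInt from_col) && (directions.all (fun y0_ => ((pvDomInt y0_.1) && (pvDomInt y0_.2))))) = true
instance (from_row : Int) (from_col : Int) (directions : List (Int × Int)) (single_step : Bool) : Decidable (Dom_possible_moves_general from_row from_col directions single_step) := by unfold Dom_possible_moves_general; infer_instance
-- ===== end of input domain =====

-- B computes each ray's length by a closed-form floor-division bound instead of A's
-- square-by-square while-loop walk (objective: alternative algorithm, same asymptotic cost).


-- ===== PORT A =====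
-- A's 'while True' walk; fuel 16 is enough on every input of Pre_ (a nonzero direction
-- leaves the 8x8 board after at most 8 in-bounds steps; (0,0) stops at once there).
def pvALoop (dr dc : Int) (single_step : Bool) : Nat → Int → Int → List (Int × Int) → List (Int × Int)
  | 0, _, _, acc => acc
  | fuel+1, r, c, acc =>
    let r' := r + dr
    let c' := c + dc
    if 0 ≤ r' ∧ r' < 8 ∧ 0 ≤ c' ∧ c' < 8 then
      if single_step then acc ++ [(r', c')]
      else pvALoop dr dc single_step fuel r' c' (acc ++ [(r', c')])
    else acc

def possible_moves_general (from_row : Int) (from_col : Int) (directions : List (Int × Int)) (single_step : Bool) : List (Int × Int) :=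
  directions.foldl (fun moves d => pvALoop d.1 d.2 single_step 16 from_row from_col moves) []

-- ===== PORT B =====
-- min(bounds) of Source B; bounds is nonempty inside Pre_ whenever this is evaluated
-- (Python raises ValueError on the empty list; that input is outside Pre_).
def pvMinBounds (from_row from_col dr dc : Int) : Int :=
  let bounds : List Int :=
    (if dr > 0 then [PySem.Int.floordiv (7 - from_row) dr]
     else if dr < 0 then [PySem.Int.floordiv from_row (-dr)] else []) ++
    (if dc > 0 then [PySem.Int.floordiv (7 - from_col) dc]
     else if dc < 0 then [PySem.Int.floordiv from_col (-dc)] else [])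
  match PySem.List.min? bounds (fun x => x) with
  | some m => m
  | none => 0

def pvBBlock (from_row from_col dr dc : Int) (single_step : Bool) : List (Int × Int) :=
  let r1 := from_row + dr
  let c1 := from_col + dc
  if 0 ≤ r1 ∧ r1 < 8 ∧ 0 ≤ c1 ∧ c1 < 8 then
    let k : Int := if single_step then 1 else pvMinBounds from_row from_col dr dc
    (PySem.List.pyRange 1 (k+1) 1).map (fun i => (from_row + i*dr, from_col + i*dc))
  else []

def possible_moves_general_alt (from_row : Int) (from_col : Int) (directions : List (Int × Int)) (single_step : Bool) : List (Int × Int) :=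
  directions.foldl (fun moves d => moves ++ pvBBlock from_row from_col d.1 d.2 single_step) []

-- ===== PRECONDITION & SPEC =====
-- Pre_ excludes only the inputs where A never returns: with single_step false, a (0,0)
-- direction and an in-bounds start, A's while-loop runs forever (and B raises ValueError).
def Pre_possible_moves_general (from_row : Int) (from_col : Int) (directions : List (Int × Int)) (single_step : Bool) : Prop :=
  ¬ (single_step = false ∧ (0, 0) ∈ directions ∧ 0 ≤ from_row ∧ from_row < 8 ∧ 0 ≤ from_col ∧ from_col < 8)
instance (from_row : Int) (from_col : Int) (directions : List (Int × Int)) (single_step : Bool) : Decidable (Pre_possible_moves_general from_row from_col directions single_step) := by unfold Pre_possible_moves_general; infer_instance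

def pvWitness_possible_moves_general : Int × Int × (List (Int × Int)) × Bool := (3, 4, [(1, 0), (0, -1), (1, 1)], false)

def Spec_possible_moves_general (from_row : Int) (from_col : Int) (directions : List (Int × Int)) (single_step : Bool) (out : List (Int × Int)) : Prop := out = possible_moves_general_alt from_row from_col directions single_step
instance (from_row : Int) (from_col : Int) (directions : List (Int × Int)) (single_step : Bool) (out : List (Int × Int)) : Decidable (Spec_possible_moves_general from_row from_col directions single_step out) := by unfold Spec_possible_moves_general; infer_instance

-- ===== CLAIM (what is proved, stated in full; the proofs are below) =====
def Claim_equal_possible_moves_general : Prop := ∀ (from_row : Int) (from_col : Int) (directions : List (Int × Int)) (single_step : Bool), Dom_possible_moves_general from_row from_col directions single_step → Pre_possible_moves_general from_row from_col directions single_step → Spec_possible_moves_general from_row from_col directions single_step (possible_moves_general from_row from_col directions single_step)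

-- ===== LEMMAS AND PROOFS =====

-- one axis, positive component: in-bounds ↔ i ≤ (7-p)//d
lemma pv_axis_pos (d p i : Int) (hd : 0 < d) (h0 : 0 ≤ p + d) (hi : 1 ≤ i) :
    (0 ≤ p + i*d ∧ p + i*d < 8) ↔ i ≤ PySem.Int.floordiv (7 - p) d := by
  rw [PySem.Int.floordiv_eq_ediv_of_pos hd, Int.le_ediv_iff_mul_le hd]
  constructor
  · rintro ⟨-, h8⟩; nlinarith
  · intro h
    have hlow : d ≤ i * d := by nlinarith
    constructor <;> nlinarith

-- one axis, negative component: in-bounds ↔ i ≤ p//(-d)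
lemma pv_axis_neg (d p i : Int) (hd : d < 0) (h7 : p + d < 8) (hi : 1 ≤ i) :
    (0 ≤ p + i*d ∧ p + i*d < 8) ↔ i ≤ PySem.Int.floordiv p (-d) := by
  have hd' : 0 < -d := by omega
  rw [PySem.Int.floordiv_eq_ediv_of_pos hd', Int.le_ediv_iff_mul_le hd']
  constructor
  · rintro ⟨h0, -⟩; nlinarith
  · intro h
    have hup : i * d ≤ d := by nlinarith
    constructor <;> nlinarith

lemma pv_axis_pos_le8 (d p : Int) (hd : 0 < d) (h0 : 0 ≤ p + d) :
    PySem.Int.floordiv (7 - p) d ≤ 8 := by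
  rw [PySem.Int.floordiv_eq_ediv_of_pos hd]
  by_contra h
  have h9 : 9 ≤ (7 - p) / d := by omega
  have := (Int.le_ediv_iff_mul_le hd).mp h9
  nlinarith

lemma pv_axis_neg_le8 (d p : Int) (hd : d < 0) (h7 : p + d < 8) :
    PySem.Int.floordiv p (-d) ≤ 8 := by
  have hd' : 0 < -d := by omega
  rw [PySem.Int.floordiv_eq_ediv_of_pos hd']
  by_contra h
  have h9 : 9 ≤ p / (-d) := by omega
  have := (Int.le_ediv_iff_mul_le hd').mp h9
  nlinarith

-- the closed form: k = pvMinBounds characterises exactly the in-bounds steps of the ray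
lemma pv_key (fr fc dr dc : Int) (hne : ¬ (dr = 0 ∧ dc = 0))
    (h1 : 0 ≤ fr + dr) (h2 : fr + dr < 8) (h3 : 0 ≤ fc + dc) (h4 : fc + dc < 8) :
    1 ≤ pvMinBounds fr fc dr dc ∧ pvMinBounds fr fc dr dc ≤ 8 ∧
      ∀ i : Int, 1 ≤ i →
        ((0 ≤ fr + i*dr ∧ fr + i*dr < 8 ∧ 0 ≤ fc + i*dc ∧ fc + i*dc < 8) ↔ i ≤ pvMinBounds fr fc dr dc) := by
  rcases lt_trichotomy dr 0 with hr | hr | hr <;>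
    rcases lt_trichotomy dc 0 with hc | hc | hc
  · have hred : pvMinBounds fr fc dr dc = min (PySem.Int.floordiv fr (-dr)) (PySem.Int.floordiv fc (-dc)) := by
      simp [pvMinBounds, hr, show ¬ dr > 0 from by omega, hc, show ¬ dc > 0 from by omega, PySem.List.min?_id_cons]
    have hA : ∀ i : Int, 1 ≤ i → ((0 ≤ fr + i*dr ∧ fr + i*dr < 8) ↔ i ≤ PySem.Int.floordiv fr (-dr)) := fun i hi => pv_axis_neg dr fr i hr h2 hi
    have hC : ∀ i : Int, 1 ≤ i → ((0 ≤ fc + i*dc ∧ fc + i*dc < 8) ↔ i ≤ PySem.Int.floordiv fc (-dc)) := fun i hi => pv_axis_neg dc fc i hc h4 hi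
    have hA1 := hA 1 le_rfl; have hC1 := hC 1 le_rfl
    rw [one_mul] at hA1 hC1
    refine ⟨?_, ?_, ?_⟩
    · rw [hred, le_min_iff]; exact ⟨hA1.mp ⟨h1, h2⟩, hC1.mp ⟨h3, h4⟩⟩
    · rw [hred]; exact le_trans (min_le_left _ _) (pv_axis_neg_le8 dr fr hr h2)
    · intro i hi
      rw [hred, le_min_iff]
      constructor
      · rintro ⟨a, b, c, d⟩; exact ⟨(hA i hi).mp ⟨a, b⟩, (hC i hi).mp ⟨c, d⟩⟩
      · rintro ⟨x, y⟩
        obtain ⟨a, b⟩ := (hA i hi).mpr x; obtain ⟨c, d⟩ := (hC i hi).mpr y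
        exact ⟨a, b, c, d⟩
  · subst hc
    have hred : pvMinBounds fr fc dr 0 = PySem.Int.floordiv fr (-dr) := by
      simp [pvMinBounds, hr, show ¬ dr > 0 from by omega, PySem.List.min?_id_cons]
    have hA : ∀ i : Int, 1 ≤ i → ((0 ≤ fr + i*dr ∧ fr + i*dr < 8) ↔ i ≤ PySem.Int.floordiv fr (-dr)) := fun i hi => pv_axis_neg dr fr i hr h2 hi
    have hA1 := hA 1 le_rfl; rw [one_mul] at hA1
    refine ⟨?_, ?_, ?_⟩
    · rw [hred]; exact hA1.mp ⟨h1, h2⟩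
    · rw [hred]; exact pv_axis_neg_le8 dr fr hr h2
    · intro i hi
      rw [hred]
      simp only [mul_zero, add_zero]
      constructor
      · rintro ⟨a, b, -, -⟩; exact (hA i hi).mp ⟨a, b⟩
      · intro x; obtain ⟨a, b⟩ := (hA i hi).mpr x
        exact ⟨a, b, by omega, by omega⟩
  · have hred : pvMinBounds fr fc dr dc = min (PySem.Int.floordiv fr (-dr)) (PySem.Int.floordiv (7 - fc) dc) := by
      simp [pvMinBounds, hr, show ¬ dr > 0 from by omega, hc, PySem.List.min?_id_cons]
    have hA : ∀ i : Int, 1 ≤ i → ((0 ≤ fr + i*dr ∧ fr + i*dr < 8) ↔ i ≤ PySem.Int.floordiv fr (-dr)) := fun i hi => pv_axis_neg dr fr i hr h2 hi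
    have hC : ∀ i : Int, 1 ≤ i → ((0 ≤ fc + i*dc ∧ fc + i*dc < 8) ↔ i ≤ PySem.Int.floordiv (7 - fc) dc) := fun i hi => pv_axis_pos dc fc i hc h3 hi
    have hA1 := hA 1 le_rfl; have hC1 := hC 1 le_rfl
    rw [one_mul] at hA1 hC1
    refine ⟨?_, ?_, ?_⟩
    · rw [hred, le_min_iff]; exact ⟨hA1.mp ⟨h1, h2⟩, hC1.mp ⟨h3, h4⟩⟩
    · rw [hred]; exact le_trans (min_le_left _ _) (pv_axis_neg_le8 dr fr hr h2)
    · intro i hi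
      rw [hred, le_min_iff]
      constructor
      · rintro ⟨a, b, c, d⟩; exact ⟨(hA i hi).mp ⟨a, b⟩, (hC i hi).mp ⟨c, d⟩⟩
      · rintro ⟨x, y⟩
        obtain ⟨a, b⟩ := (hA i hi).mpr x; obtain ⟨c, d⟩ := (hC i hi).mpr y
        exact ⟨a, b, c, d⟩
  · subst hr
    have hred : pvMinBounds fr fc 0 dc = PySem.Int.floordiv fc (-dc) := by
      simp [pvMinBounds, hc, show ¬ dc > 0 from by omega, PySem.List.min?_id_cons]
    have hC : ∀ i : Int, 1 ≤ i → ((0 ≤ fc + i*dc ∧ fc + i*dc < 8) ↔ i ≤ PySem.Int.floordiv fc (-dc)) := fun i hi => pv_axis_neg dc fc i hc h4 hi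
    have hC1 := hC 1 le_rfl; rw [one_mul] at hC1
    refine ⟨?_, ?_, ?_⟩
    · rw [hred]; exact hC1.mp ⟨h3, h4⟩
    · rw [hred]; exact pv_axis_neg_le8 dc fc hc h4
    · intro i hi
      rw [hred]
      simp only [mul_zero, add_zero]
      constructor
      · rintro ⟨-, -, c, d⟩; exact (hC i hi).mp ⟨c, d⟩
      · intro x; obtain ⟨c, d⟩ := (hC i hi).mpr x
        exact ⟨by omega, by omega, c, d⟩
  · exact absurd ⟨hr, hc⟩ hne
  · subst hr
    have hred : pvMinBounds fr fc 0 dc = PySem.Int.floordiv (7 - fc) dc := by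
      simp [pvMinBounds, hc, PySem.List.min?_id_cons]
    have hC : ∀ i : Int, 1 ≤ i → ((0 ≤ fc + i*dc ∧ fc + i*dc < 8) ↔ i ≤ PySem.Int.floordiv (7 - fc) dc) := fun i hi => pv_axis_pos dc fc i hc h3 hi
    have hC1 := hC 1 le_rfl; rw [one_mul] at hC1
    refine ⟨?_, ?_, ?_⟩
    · rw [hred]; exact hC1.mp ⟨h3, h4⟩
    · rw [hred]; exact pv_axis_pos_le8 dc fc hc h3
    · intro i hi
      rw [hred]
      simp only [mul_zero, add_zero]
      constructor
      · rintro ⟨-, -, c, d⟩; exact (hC i hi).mp ⟨c, d⟩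
      · intro x; obtain ⟨c, d⟩ := (hC i hi).mpr x
        exact ⟨by omega, by omega, c, d⟩
  · have hred : pvMinBounds fr fc dr dc = min (PySem.Int.floordiv (7 - fr) dr) (PySem.Int.floordiv fc (-dc)) := by
      simp [pvMinBounds, hr, hc, show ¬ dc > 0 from by omega, PySem.List.min?_id_cons]
    have hA : ∀ i : Int, 1 ≤ i → ((0 ≤ fr + i*dr ∧ fr + i*dr < 8) ↔ i ≤ PySem.Int.floordiv (7 - fr) dr) := fun i hi => pv_axis_pos dr fr i hr h1 hi
    have hC : ∀ i : Int, 1 ≤ i → ((0 ≤ fc + i*dc ∧ fc + i*dc < 8) ↔ i ≤ PySem.Int.floordiv fc (-dc)) := fun i hi => pv_axis_neg dc fc i hc h4 hi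
    have hA1 := hA 1 le_rfl; have hC1 := hC 1 le_rfl
    rw [one_mul] at hA1 hC1
    refine ⟨?_, ?_, ?_⟩
    · rw [hred, le_min_iff]; exact ⟨hA1.mp ⟨h1, h2⟩, hC1.mp ⟨h3, h4⟩⟩
    · rw [hred]; exact le_trans (min_le_left _ _) (pv_axis_pos_le8 dr fr hr h1)
    · intro i hi
      rw [hred, le_min_iff]
      constructor
      · rintro ⟨a, b, c, d⟩; exact ⟨(hA i hi).mp ⟨a, b⟩, (hC i hi).mp ⟨c, d⟩⟩
      · rintro ⟨x, y⟩
        obtain ⟨a, b⟩ := (hA i hi).mpr x; obtain ⟨c, d⟩ := (hC i hi).mpr y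
        exact ⟨a, b, c, d⟩
  · subst hc
    have hred : pvMinBounds fr fc dr 0 = PySem.Int.floordiv (7 - fr) dr := by
      simp [pvMinBounds, hr, PySem.List.min?_id_cons]
    have hA : ∀ i : Int, 1 ≤ i → ((0 ≤ fr + i*dr ∧ fr + i*dr < 8) ↔ i ≤ PySem.Int.floordiv (7 - fr) dr) := fun i hi => pv_axis_pos dr fr i hr h1 hi
    have hA1 := hA 1 le_rfl; rw [one_mul] at hA1
    refine ⟨?_, ?_, ?_⟩
    · rw [hred]; exact hA1.mp ⟨h1, h2⟩
    · rw [hred]; exact pv_axis_pos_le8 dr fr hr h1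
    · intro i hi
      rw [hred]
      simp only [mul_zero, add_zero]
      constructor
      · rintro ⟨a, b, -, -⟩; exact (hA i hi).mp ⟨a, b⟩
      · intro x; obtain ⟨a, b⟩ := (hA i hi).mpr x
        exact ⟨a, b, by omega, by omega⟩
  · have hred : pvMinBounds fr fc dr dc = min (PySem.Int.floordiv (7 - fr) dr) (PySem.Int.floordiv (7 - fc) dc) := by
      simp [pvMinBounds, hr, hc, PySem.List.min?_id_cons]
    have hA : ∀ i : Int, 1 ≤ i → ((0 ≤ fr + i*dr ∧ fr + i*dr < 8) ↔ i ≤ PySem.Int.floordiv (7 - fr) dr) := fun i hi => pv_axis_pos dr fr i hr h1 hi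
    have hC : ∀ i : Int, 1 ≤ i → ((0 ≤ fc + i*dc ∧ fc + i*dc < 8) ↔ i ≤ PySem.Int.floordiv (7 - fc) dc) := fun i hi => pv_axis_pos dc fc i hc h3 hi
    have hA1 := hA 1 le_rfl; have hC1 := hC 1 le_rfl
    rw [one_mul] at hA1 hC1
    refine ⟨?_, ?_, ?_⟩
    · rw [hred, le_min_iff]; exact ⟨hA1.mp ⟨h1, h2⟩, hC1.mp ⟨h3, h4⟩⟩
    · rw [hred]; exact le_trans (min_le_left _ _) (pv_axis_pos_le8 dr fr hr h1)
    · intro i hi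
      rw [hred, le_min_iff]
      constructor
      · rintro ⟨a, b, c, d⟩; exact ⟨(hA i hi).mp ⟨a, b⟩, (hC i hi).mp ⟨c, d⟩⟩
      · rintro ⟨x, y⟩
        obtain ⟨a, b⟩ := (hA i hi).mpr x; obtain ⟨c, d⟩ := (hC i hi).mpr y
        exact ⟨a, b, c, d⟩

-- A's walk, started after j in-bounds steps, emits exactly steps j+1 .. k
lemma pv_loop_ray (fr fc dr dc k : Int)
    (hk : ∀ i : Int, 1 ≤ i →
      ((0 ≤ fr + i*dr ∧ fr + i*dr < 8 ∧ 0 ≤ fc + i*dc ∧ fc + i*dc < 8) ↔ i ≤ k)) :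
    ∀ (m fuel : Nat) (j : Int) (acc : List (Int × Int)), (j : Int) + m = k → 0 ≤ j → m < fuel →
      pvALoop dr dc false fuel (fr + j*dr) (fc + j*dc) acc
        = acc ++ (PySem.List.pyRange (j+1) (k+1) 1).map (fun i => (fr + i*dr, fc + i*dc)) := by
  intro m
  induction m with
  | zero =>
    intro fuel j acc hjm hj hf
    obtain ⟨f, rfl⟩ : ∃ f, fuel = f + 1 := ⟨fuel - 1, by omega⟩
    have hstep : ¬ (0 ≤ fr + (j+1)*dr ∧ fr + (j+1)*dr < 8 ∧ 0 ≤ fc + (j+1)*dc ∧ fc + (j+1)*dc < 8) := by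
      intro h
      have := (hk (j+1) (by omega)).mp h
      omega
    have e1 : fr + j*dr + dr = fr + (j+1)*dr := by ring
    have e2 : fc + j*dc + dc = fc + (j+1)*dc := by ring
    simp only [pvALoop, e1, e2]
    rw [if_neg hstep, PySem.List.pyRange_one_eq_nil (by omega)]
    simp
  | succ m ih =>
    intro fuel j acc hjm hj hf
    obtain ⟨f, rfl⟩ : ∃ f, fuel = f + 1 := ⟨fuel - 1, by omega⟩
    have hstep : 0 ≤ fr + (j+1)*dr ∧ fr + (j+1)*dr < 8 ∧ 0 ≤ fc + (j+1)*dc ∧ fc + (j+1)*dc < 8 :=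
      (hk (j+1) (by omega)).mpr (by push_cast at hjm; omega)
    have e1 : fr + j*dr + dr = fr + (j+1)*dr := by ring
    have e2 : fc + j*dc + dc = fc + (j+1)*dc := by ring
    simp only [pvALoop, e1, e2]
    rw [if_pos hstep]
    rw [ih f (j+1) (acc ++ [(fr + (j+1)*dr, fc + (j+1)*dc)]) (by push_cast at hjm ⊢; omega) (by omega) (by omega)]
    have hcons : PySem.List.pyRange (j+1) (k+1) 1 = (j+1) :: PySem.List.pyRange (j+1+1) (k+1) 1 :=
      PySem.List.pyRange_one_cons (by push_cast at hjm; omega)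
    rw [hcons, List.map_cons]
    simp only [List.append_assoc, List.singleton_append]
    simp

-- one direction: A's walk appends exactly B's block
lemma pv_dir_eq (fr fc dr dc : Int) (ss : Bool)
    (hpre : ¬ (ss = false ∧ dr = 0 ∧ dc = 0 ∧ 0 ≤ fr ∧ fr < 8 ∧ 0 ≤ fc ∧ fc < 8))
    (acc : List (Int × Int)) :
    pvALoop dr dc ss 16 fr fc acc = acc ++ pvBBlock fr fc dr dc ss := by
  by_cases hin : 0 ≤ fr + dr ∧ fr + dr < 8 ∧ 0 ≤ fc + dc ∧ fc + dc < 8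
  · cases ss with
    | true =>
      simp only [pvALoop, pvBBlock, if_pos hin, if_true]
      rw [PySem.List.pyRange_one_singleton, List.map_cons, List.map_nil]
      simp
    | false =>
      have hne : ¬ (dr = 0 ∧ dc = 0) := by
        rintro ⟨rfl, rfl⟩
        simp only [add_zero] at hin
        exact hpre ⟨rfl, rfl, rfl, by omega⟩
      obtain ⟨hk1, hk8, hk⟩ := pv_key fr fc dr dc hne hin.1 hin.2.1 hin.2.2.1 hin.2.2.2
      set k := pvMinBounds fr fc dr dc with hkdef
      have hmain := pv_loop_ray fr fc dr dc k hk k.toNat 16 0 acc (by omega) le_rfl (by omega)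
      simp only [zero_mul, add_zero, zero_add] at hmain
      rw [hmain]
      simp only [pvBBlock, if_pos hin, ← hkdef, if_neg (Bool.false_ne_true)]
  · cases ss <;>
      · simp only [pvALoop, pvBBlock]
        rw [if_neg hin, if_neg hin]
        simp

-- fold the per-direction equality through the direction list
lemma pv_fold (fr fc : Int) (ss : Bool) (dirs : List (Int × Int))
    (hpre : ∀ d ∈ dirs, ¬ (ss = false ∧ d.1 = 0 ∧ d.2 = 0 ∧ 0 ≤ fr ∧ fr < 8 ∧ 0 ≤ fc ∧ fc < 8)) :
    ∀ acc : List (Int × Int),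
      dirs.foldl (fun moves d => pvALoop d.1 d.2 ss 16 fr fc moves) acc
        = dirs.foldl (fun moves d => moves ++ pvBBlock fr fc d.1 d.2 ss) acc := by
  induction dirs with
  | nil => intro acc; rfl
  | cons d t ih =>
    intro acc
    simp only [List.foldl_cons]
    rw [pv_dir_eq fr fc d.1 d.2 ss (hpre d List.mem_cons_self) acc]
    exact ih (fun e he => hpre e (List.mem_cons_of_mem _ he)) _

-- ===== VERDICT (by name: the statement is the Claim_ definition above) =====
theorem possible_moves_general_spec : Claim_equal_possible_moves_general := by
  intro fr fc dirs ss _ hpre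
  unfold Spec_possible_moves_general possible_moves_general possible_moves_general_alt
  apply pv_fold
  intro d hd
  rintro ⟨hss, h1, h2, hb⟩
  exact hpre ⟨hss, by rw [show d = (0,0) from Prod.ext h1 h2] at hd; exact hd, hb⟩
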